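-- pv_equiv track=rewrite | github.com/MSalopek/dnd_webref | tools/scripts/bestiary.py | _handleTags
-- ===== SOURCE A (Python) =====
-- def _handleTags(string):
--     commaPos = [pos for pos, char in enumerate(string) if char == ","]
--     tags = []
--     # keep it simple stupid - this is always the same in my files
--     tags.append(string[7:commaPos[0]])
--     tags.append(string[commaPos[0]+2: commaPos[1]])
--     tags.append(string[commaPos[1]+2: commaPos[2]])
--     tags.append(string[commaPos[2]+2: len(string)-2])
--     return tags
-- ===== SOURCE B (Python) =====
-- def _handleTags(string):
--     parts = string.split(",", 3)
--     return [parts[0][7:], parts[1][1:], parts[2][1:], parts[3][1:-2]]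
-- ===== Notes on version B (the rewrite author's own statement) =====
-- stated objective: idiomatic
-- what changed: Replaces A's enumerate-scan that collects every comma position plus four index-arithmetic slices with a single split(',', 3) into four segments followed by fixed prefix/suffix trims.
-- outside the precondition, e.g. on _handleTags(','): A raises IndexError, B raises IndexError
import Mathlib
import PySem

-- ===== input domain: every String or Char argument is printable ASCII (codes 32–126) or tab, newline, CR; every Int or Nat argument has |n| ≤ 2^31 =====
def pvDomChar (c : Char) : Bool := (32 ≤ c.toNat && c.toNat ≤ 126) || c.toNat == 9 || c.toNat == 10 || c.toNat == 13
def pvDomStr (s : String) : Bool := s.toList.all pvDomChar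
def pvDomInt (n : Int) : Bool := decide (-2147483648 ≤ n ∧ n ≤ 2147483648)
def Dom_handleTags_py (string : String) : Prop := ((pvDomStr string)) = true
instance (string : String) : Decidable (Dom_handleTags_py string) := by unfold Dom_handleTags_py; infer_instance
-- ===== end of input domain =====

-- B replaces A's enumerate-scan over all comma positions (and index-arithmetic slicing)
-- with a single split(',', 3) into four segments plus fixed trims; same values, same cost.

-- ===== PORT A =====
def handleTags_py (string : String) : List String :=
  let commaPos : List Int :=
    ((PySem.List.enumerate string.toList 0).filter (fun p => p.2 == ',')).map (·.1)
  match PySem.List.pyGet? commaPos 0, PySem.List.pyGet? commaPos 1, PySem.List.pyGet? commaPos 2 with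
  | some c0, some c1, some c2 =>
      [PySem.Str.slice string (some 7) (some c0),
       PySem.Str.slice string (some (c0 + 2)) (some c1),
       PySem.Str.slice string (some (c1 + 2)) (some c2),
       PySem.Str.slice string (some (c2 + 2)) (some (PySem.Str.len string - 2))]
  | _, _, _ => []

-- ===== PORT B =====
def handleTags_py_alt (string : String) : List String :=
  match PySem.Str.splitMax? string "," 3 with
  | none => []
  | some parts =>
    match PySem.List.pyGet? parts 0 with
    | none => []
    | some p0 =>
      match PySem.List.pyGet? parts 1 with
      | none => []
      | some p1 =>
        match PySem.List.pyGet? parts 2 with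
        | none => []
        | some p2 =>
          match PySem.List.pyGet? parts 3 with
          | none => []
          | some p3 =>
            [PySem.Str.slice p0 (some 7) none,
             PySem.Str.slice p1 (some 1) none,
             PySem.Str.slice p2 (some 1) none,
             PySem.Str.slice p3 (some 1) (some (-2))]

-- ===== PRECONDITION & SPEC =====
-- On strings with fewer than three commas the Python A raises IndexError (commaPos[k]),
-- and so does B (parts[3]); exactly those inputs are excluded.
def Pre_handleTags_py (string : String) : Prop := 3 ≤ string.toList.count ','
instance (string : String) : Decidable (Pre_handleTags_py string) := by
  unfold Pre_handleTags_py; infer_instance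

def pvWitness_handleTags_py : String := "Speak: fiendish, telepathy 100 ft, Common, Draconic)."

def Spec_handleTags_py (string : String) (out : List String) : Prop := out = handleTags_py_alt string
instance (string : String) (out : List String) : Decidable (Spec_handleTags_py string out) := by
  unfold Spec_handleTags_py; infer_instance

-- ===== CLAIM (what is proved, stated in full; the proofs are below) =====
def Claim_equal_handleTags_py : Prop :=
  ∀ (string : String), Dom_handleTags_py string → Pre_handleTags_py string →
    Spec_handleTags_py string (handleTags_py string)

-- ===== LEMMAS AND PROOFS =====

-- one step of Python's split loop over a separator-free prefix
theorem go_skip (a : List Char) (h : ',' ∉ a) : ∀ (f : Nat) (m : Nat) (l' cur : List Char)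
    (acc : List (List Char)), m ≠ 0 → a.length < f →
    PySem.Chars.splitOnMax.go [','] f m (a ++ l') cur acc
      = PySem.Chars.splitOnMax.go [','] (f - a.length) m l' (a.reverse ++ cur) acc := by
  induction a with
  | nil => intro f m l' cur acc _ _; simp
  | cons c a ih =>
    intro f m l' cur acc hm hf
    cases f with
    | zero => omega
    | succ f' =>
      cases m with
      | zero => exact absurd rfl hm
      | succ m' =>
        have hc : c ≠ ',' := fun e => h (e ▸ List.mem_cons_self ..)
        have hc' : (',' == c) = false := by
          simp [beq_eq_false_iff_ne]; exact fun e => hc e.symm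
        simp only [List.cons_append, PySem.Chars.splitOnMax.go, List.isPrefixOf, hc']
        have := ih (fun hx => h (List.mem_cons_of_mem _ hx)) f' (m' + 1) l' (c :: cur) acc
          (by omega) (by simpa using hf)
        simp only [List.length_cons] at *
        rw [if_neg (by omega)]
        rw [if_neg (by simp)]
        rw [this]
        have e : f' + 1 - (a.length + 1) = f' - a.length := by omega
        simp [e, List.append_assoc]

theorem go_comma (f m : Nat) (l cur : List Char) (acc : List (List Char))
    (hm : m ≠ 0) (hf : f ≠ 0) :
    PySem.Chars.splitOnMax.go [','] f m (',' :: l) cur acc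
      = PySem.Chars.splitOnMax.go [','] (f - 1) (m - 1) l [] (cur.reverse :: acc) := by
  cases f with
  | zero => exact absurd rfl hf
  | succ f' =>
    cases m with
    | zero => exact absurd rfl hm
    | succ m' => simp [PySem.Chars.splitOnMax.go, List.isPrefixOf]

theorem go_done (f : Nat) (l cur : List Char) (acc : List (List Char)) :
    PySem.Chars.splitOnMax.go [','] f 0 l cur acc = ((cur.reverse ++ l) :: acc).reverse := by
  cases f with
  | zero => simp [PySem.Chars.splitOnMax.go]
  | succ f' =>
    cases l with
    | nil => simp [PySem.Chars.splitOnMax.go]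
    | cons c r => simp [PySem.Chars.splitOnMax.go]

theorem split3 (a0 a1 a2 a3 : List Char) (h0 : ',' ∉ a0) (h1 : ',' ∉ a1) (h2 : ',' ∉ a2) :
    PySem.Chars.splitOnMax (a0 ++ ',' :: (a1 ++ ',' :: (a2 ++ ',' :: a3))) [','] 3
      = [a0, a1, a2, a3] := by
  have hL : (a0 ++ ',' :: (a1 ++ ',' :: (a2 ++ ',' :: a3))).length
      = a0.length + a1.length + a2.length + a3.length + 3 := by
    simp [List.length_append]; omega
  unfold PySem.Chars.splitOnMax
  rw [if_neg (by norm_num)]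
  rw [go_skip a0 h0 _ _ _ _ _ (by decide) (by omega)]
  rw [go_comma _ _ _ _ _ (by decide) (by omega)]
  rw [go_skip a1 h1 _ _ _ _ _ (by decide) (by omega)]
  rw [go_comma _ _ _ _ _ (by decide) (by omega)]
  rw [go_skip a2 h2 _ _ _ _ _ (by decide) (by omega)]
  rw [go_comma _ _ _ _ _ (by decide) (by omega)]
  have hm : ((3 : Int).toNat - 1 - 1 - 1) = 0 := by decide
  rw [hm, go_done]
  simp

-- comma positions of (comma-free prefix) ++ ',' :: rest
theorem cpSeg (a rest : List Char) (h : ',' ∉ a) (s : Int) :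
    ((PySem.List.enumerate (a ++ ',' :: rest) s).filter (fun p => p.2 == ',')).map (·.1)
      = (s + a.length) ::
        ((PySem.List.enumerate rest (s + a.length + 1)).filter (fun p => p.2 == ',')).map (·.1) := by
  rw [PySem.List.enumerate_append, List.filter_append, PySem.List.enumerate_cons]
  have hnil : (PySem.List.enumerate a s).filter (fun p => p.2 == ',') = [] := by
    rw [List.filter_eq_nil_iff]
    intro p hp
    obtain ⟨k, hk, rfl⟩ := (PySem.List.mem_enumerate_iff a s p).mp hp
    have hmem : a[k] ∈ a := a.getElem_mem hk
    simp only [beq_iff_eq]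
    exact fun e => h (e ▸ hmem)
  rw [hnil]
  simp

-- the clamped slice arithmetic shared by the four tags
theorem take_sub_drop_append (a rest : List Char) (k : Nat) :
    List.take (a.length - k) (List.drop k (a ++ rest)) = List.drop k a := by
  by_cases hk : k ≤ a.length
  · rw [List.drop_append_of_le_length hk, List.take_left' (by simp)]
  · have h1 : a.length - k = 0 := by omega
    rw [h1, List.take_zero, List.drop_eq_nil_of_le (by omega)]

theorem slice_one_negtwo (l : List Char) :
    PySem.List.slice l (some 1) (some (-2)) = List.take (l.length - 3) (List.drop 1 l) := by
  cases l with
  | nil => simp [PySem.List.slice, PySem.List.clampIdx]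
  | cons c t =>
    have h2 : PySem.List.clampIdx (c :: t).length (-2) = (c :: t).length - 2 :=
      PySem.List.clampIdx_neg_ofNat _ 2 (by omega)
    have h1 : PySem.List.clampIdx (c :: t).length 1 = min 1 (c :: t).length := by
      simp
    simp only [PySem.List.slice, h2, h1]
    simp [List.length_cons]
    omega

theorem ex1 (cs : List Char) (h : 1 ≤ cs.count ',') :
    ∃ a b, cs = a ++ ',' :: b ∧ ',' ∉ a ∧ b.count ',' + 1 = cs.count ',' := by
  induction cs with
  | nil => simp at h
  | cons c t ih =>
    by_cases hc : c = ','
    · exact ⟨[], t, by simp [hc], by simp, by simp [hc]⟩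
    · have hcnt : (c :: t).count ',' = t.count ',' := by simp [hc]
      obtain ⟨a, b, he, hna, hcb⟩ := ih (by omega)
      exact ⟨c :: a, b, by simp [he], by intro hm; rcases List.mem_cons.mp hm with e | e; exacts [hc e.symm, hna e], by rw [hcnt]; omega⟩

theorem ex3 (cs : List Char) (h : 3 ≤ cs.count ',') :
    ∃ a0 a1 a2 a3, cs = a0 ++ ',' :: (a1 ++ ',' :: (a2 ++ ',' :: a3))
      ∧ ',' ∉ a0 ∧ ',' ∉ a1 ∧ ',' ∉ a2 := by
  obtain ⟨a0, b0, he0, hn0, hc0⟩ := ex1 cs (by omega)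
  have hb0 : 2 ≤ b0.count ',' := by omega
  obtain ⟨a1, b1, he1, hn1, hc1⟩ := ex1 b0 (by omega)
  obtain ⟨a2, b2, he2, hn2, _⟩ := ex1 b1 (by omega)
  exact ⟨a0, a1, a2, b2, by rw [he0, he1, he2], hn0, hn1, hn2⟩

theorem tag0 (a0 rest : List Char) :
    PySem.List.slice (a0 ++ rest) (some 7) (some (a0.length : Int))
      = PySem.List.slice a0 (some 7) none := by
  rw [show PySem.List.slice a0 (some 7) none = List.drop (7:Int).toNat a0 from PySem.List.slice_from a0 (by norm_num)]
  rw [PySem.List.slice_toNat (a0 ++ rest) (a := 7) (b := (a0.length : Int)) (by norm_num) (by omega)]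
  simpa using take_sub_drop_append a0 rest 7

theorem tag1 (a0 a1 rest : List Char) :
    PySem.List.slice (a0 ++ ',' :: (a1 ++ rest)) (some ((a0.length : Int) + 2))
        (some ((a0.length : Int) + 1 + a1.length))
      = PySem.List.slice a1 (some 1) none := by
  rw [PySem.List.slice_from_one]
  rw [PySem.List.slice_toNat (a0 ++ ',' :: (a1 ++ rest))
      (a := (a0.length : Int) + 2) (b := (a0.length : Int) + 1 + a1.length) (by omega) (by omega)]
  have t1 : ((a0.length : Int) + 2).toNat = a0.length + 2 := by omega
  have t2 : ((a0.length : Int) + 1 + a1.length).toNat = a0.length + 1 + a1.length := by omega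
  rw [t1, t2]
  have harr : a0.length + 1 + a1.length - (a0.length + 2) = a1.length - 1 := by omega
  rw [harr]
  have hsh : a0 ++ ',' :: (a1 ++ rest) = (a0 ++ [',']) ++ (a1 ++ rest) := by simp
  have hstep : a0.length + 2 = (a0 ++ [',']).length + 1 := by simp
  rw [hsh, hstep, ← List.drop_drop, List.drop_left]
  rw [take_sub_drop_append a1 rest 1, List.drop_one]

theorem tag2 (a0 a1 a2 rest : List Char) :
    PySem.List.slice (a0 ++ ',' :: (a1 ++ ',' :: (a2 ++ rest)))
        (some ((a0.length : Int) + 1 + a1.length + 2))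
        (some ((a0.length : Int) + 1 + a1.length + 1 + a2.length))
      = PySem.List.slice a2 (some 1) none := by
  rw [PySem.List.slice_from_one]
  rw [PySem.List.slice_toNat (a0 ++ ',' :: (a1 ++ ',' :: (a2 ++ rest)))
      (a := (a0.length : Int) + 1 + a1.length + 2)
      (b := (a0.length : Int) + 1 + a1.length + 1 + a2.length) (by omega) (by omega)]
  have t1 : ((a0.length : Int) + 1 + a1.length + 2).toNat = a0.length + 1 + a1.length + 2 := by omega
  have t2 : ((a0.length : Int) + 1 + a1.length + 1 + a2.length).toNat
      = a0.length + 1 + a1.length + 1 + a2.length := by omega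
  rw [t1, t2]
  have harr : a0.length + 1 + a1.length + 1 + a2.length - (a0.length + 1 + a1.length + 2)
      = a2.length - 1 := by omega
  rw [harr]
  have hsh : a0 ++ ',' :: (a1 ++ ',' :: (a2 ++ rest))
      = (a0 ++ ',' :: (a1 ++ [','])) ++ (a2 ++ rest) := by simp
  have hstep : a0.length + 1 + a1.length + 2 = (a0 ++ ',' :: (a1 ++ [','])).length + 1 := by
    simp; omega
  rw [hsh, hstep, ← List.drop_drop, List.drop_left]
  rw [take_sub_drop_append a2 rest 1, List.drop_one]

theorem tag3 (a0 a1 a2 a3 : List Char) :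
    PySem.List.slice (a0 ++ ',' :: (a1 ++ ',' :: (a2 ++ ',' :: a3)))
        (some ((a0.length : Int) + 1 + a1.length + 1 + a2.length + 2))
        (some (((a0 ++ ',' :: (a1 ++ ',' :: (a2 ++ ',' :: a3))).length : Int) - 2))
      = PySem.List.slice a3 (some 1) (some (-2)) := by
  have hL : (a0 ++ ',' :: (a1 ++ ',' :: (a2 ++ ',' :: a3))).length
      = a0.length + a1.length + a2.length + a3.length + 3 := by
    simp [List.length_append]; omega
  rw [slice_one_negtwo]
  rw [PySem.List.slice_toNat (a0 ++ ',' :: (a1 ++ ',' :: (a2 ++ ',' :: a3)))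
      (a := (a0.length : Int) + 1 + a1.length + 1 + a2.length + 2)
      (b := ((a0 ++ ',' :: (a1 ++ ',' :: (a2 ++ ',' :: a3))).length : Int) - 2)
      (by omega) (by rw [hL]; push_cast; omega)]
  have t1 : ((a0.length : Int) + 1 + a1.length + 1 + a2.length + 2).toNat
      = a0.length + 1 + a1.length + 1 + a2.length + 2 := by omega
  have t2 : (((a0 ++ ',' :: (a1 ++ ',' :: (a2 ++ ',' :: a3))).length : Int) - 2).toNat
      = a0.length + a1.length + a2.length + a3.length + 1 := by rw [hL]; push_cast; omega
  rw [t1, t2]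
  have harr : a0.length + a1.length + a2.length + a3.length + 1
      - (a0.length + 1 + a1.length + 1 + a2.length + 2) = a3.length - 3 := by omega
  rw [harr]
  have hsh : a0 ++ ',' :: (a1 ++ ',' :: (a2 ++ ',' :: a3))
      = (a0 ++ ',' :: (a1 ++ ',' :: (a2 ++ [',']))) ++ a3 := by simp
  have hstep : a0.length + 1 + a1.length + 1 + a2.length + 2
      = (a0 ++ ',' :: (a1 ++ ',' :: (a2 ++ [',']))).length + 1 := by simp; omega
  rw [hsh, hstep, ← List.drop_drop, List.drop_left]

theorem pyGet0 {α : Type} (x : α) (l : List α) : PySem.List.pyGet? (x :: l) 0 = some x := by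
  simpa using PySem.List.pyGet?_natCast (x :: l) 0

theorem pyGet1 {α : Type} (x y : α) (l : List α) : PySem.List.pyGet? (x :: y :: l) 1 = some y := by
  simpa using PySem.List.pyGet?_natCast (x :: y :: l) 1

theorem pyGet2 {α : Type} (x y z : α) (l : List α) :
    PySem.List.pyGet? (x :: y :: z :: l) 2 = some z := by
  simpa using PySem.List.pyGet?_natCast (x :: y :: z :: l) 2


theorem main_eq (s : String) (a0 a1 a2 a3 : List Char)
    (hcs : s.toList = a0 ++ ',' :: (a1 ++ ',' :: (a2 ++ ',' :: a3)))
    (h0 : ',' ∉ a0) (h1 : ',' ∉ a1) (h2 : ',' ∉ a2) :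
    handleTags_py s = handleTags_py_alt s := by
  have hmap := PySem.Str.splitMax?_map s "," 3
  have hsep : (",".toList) = [','] := rfl
  rw [hcs, hsep] at hmap
  have hsplit : PySem.Chars.splitMax? (a0 ++ ',' :: (a1 ++ ',' :: (a2 ++ ',' :: a3))) [','] 3
      = some [a0, a1, a2, a3] := by
    unfold PySem.Chars.splitMax?
    rw [if_neg (by simp)]
    exact congrArg some (split3 a0 a1 a2 a3 h0 h1 h2)
  rw [hsplit] at hmap
  cases hsp : PySem.Str.splitMax? s "," 3 with
  | none => rw [hsp] at hmap; simp at hmap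
  | some parts =>
    rw [hsp] at hmap
    simp only [Option.map_some, Option.some.injEq] at hmap
    rcases parts with _ | ⟨p0, _ | ⟨p1, _ | ⟨p2, _ | ⟨p3, _ | ⟨q, rest⟩⟩⟩⟩⟩ <;> simp at hmap
    obtain ⟨e0, e1, e2, e3⟩ := hmap
    have hB : handleTags_py_alt s =
        [PySem.Str.slice p0 (some 7) none,
         PySem.Str.slice p1 (some 1) none,
         PySem.Str.slice p2 (some 1) none,
         PySem.Str.slice p3 (some 1) (some (-2))] := by
      unfold handleTags_py_alt
      rw [hsp]
      rfl
    have hA : handleTags_py s =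
        [PySem.Str.slice s (some 7) (some (0 + (a0.length : Int))),
         PySem.Str.slice s (some (0 + (a0.length : Int) + 2))
           (some (0 + (a0.length : Int) + 1 + a1.length)),
         PySem.Str.slice s (some (0 + (a0.length : Int) + 1 + a1.length + 2))
           (some (0 + (a0.length : Int) + 1 + a1.length + 1 + a2.length)),
         PySem.Str.slice s (some (0 + (a0.length : Int) + 1 + a1.length + 1 + a2.length + 2))
           (some (PySem.Str.len s - 2))] := by
      simp only [handleTags_py]
      rw [hcs, cpSeg a0 _ h0 0, cpSeg a1 _ h1, cpSeg a2 _ h2, pyGet0, pyGet1, pyGet2]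
    rw [hA, hB]
    simp only [zero_add, List.cons.injEq, and_true]
    have hlen : PySem.Str.len s - 2
        = ((a0 ++ ',' :: (a1 ++ ',' :: (a2 ++ ',' :: a3))).length : Int) - 2 := by
      rw [PySem.Str.len, hcs]
    refine ⟨?_, ?_, ?_, ?_⟩ <;> rw [← String.toList_inj] <;>
      simp only [PySem.Str.toList_slice, PySem.Chars.slice_eq_listSlice, hcs, e0, e1, e2, e3, hlen]
    · exact tag0 a0 _
    · exact tag1 a0 a1 _
    · exact tag2 a0 a1 a2 _
    · exact tag3 a0 a1 a2 a3

-- ===== VERDICT (by name: the statement is the Claim_ definition above) =====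
theorem handleTags_py_spec : Claim_equal_handleTags_py := by
  intro string _ hpre
  unfold Spec_handleTags_py
  obtain ⟨a0, a1, a2, a3, hcs, h0, h1, h2⟩ := ex3 string.toList hpre
  exact main_eq string a0 a1 a2 a3 hcs h0 h1 h2
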